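-- pv_equiv track=rewrite | github.com/hwanginbeom/algorithm_study | 2.algorithm_test/21.02.09/키패드_누르기_hansol.py | solution
-- ===== SOURCE A (Python) =====
-- def distance(position, destination):
--     # 현재 위치와 누르고자 하는 번호의 차로 거리 반환
--     check = abs(position - destination)
--     if check == 0: return int(0)
--     elif check in [1, 3]: return int(1)
--     elif check in [2, 4, 6]: return int(2)
--     elif check in [5, 7, 9]:  return int(3)
--     else: return int(4)
--
-- def solution(numbers, hand):
--     # 초기값 설정
--     answer = ''
--     pos_L = 10
--     pos_R = 12
--     # 1,4,7, 3,6,9 누를 경우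
--     for i in numbers:
--         if i in [1, 4, 7]:
--             answer += 'L'
--             pos_L = i
--         elif i in [3, 6, 9]:
--             answer += 'R'
--             pos_R = i
--         # 2,5,8,0 누를 경우
--         else:
--             # 0 번을 11로 바꿔 거리 함수에 적용할 수 있게 설정
--             if i == 0: i = 11
--             # 거리가 가까운 손으로 누르기
--             if distance(pos_L, i) < distance(pos_R, i):
--                 answer += 'L'
--                 pos_L = i
--             elif distance(pos_L, i) > distance(pos_R, i):
--                 answer += 'R'
--                 pos_R = i
--             else:
--                 # 거리가 같을 경우
--                 if hand == 'left':
--                     answer += 'L'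
--                     pos_L = i
--                 else:
--                     answer += 'R'
--                     pos_R = i
--     return answer
-- ===== SOURCE B (Python) =====
-- def solution(numbers, hand):
--     def nearer(L, R, n):
--         # which hand presses key n (0 renumbered to 11) from positions L, R
--         m = 11 if n == 0 else n
--         if m in (1, 4, 7):
--             return 'L'
--         if m in (3, 6, 9):
--             return 'R'
--         d = lambda p: min(abs(p - m) // 3 + abs(p - m) % 3, 4)
--         return 'L' if d(L) < d(R) or (d(L) == d(R) and hand == 'left') else 'R'
--
--     # pass 1: the trajectory of both hands, one state per press (a scan)
--     traj = [(10, 12)]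
--     for n in numbers:
--         L, R = traj[-1]
--         m = 11 if n == 0 else n
--         traj.append((m, R) if nearer(L, R, n) == 'L' else (L, m))
--     # pass 2: read the pressing hand off each trajectory state
--     return ''.join(nearer(L, R, n) for (L, R), n in zip(traj, numbers))
-- ===== Notes on version B (the rewrite author's own statement) =====
-- stated objective: alternative
-- what changed: B splits the work into two staged passes -- a scan that materialises the full trajectory of both hand positions as a list, then a zip of that trajectory with the numbers that reads off which hand pressed each key -- instead of A's single loop interleaving answer-building with position updates, and replaces A's hand-written 13-entry difference-to-distance lookup table by the closed form min(|p-m|//3 + |p-m|%3, 4).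
import Mathlib
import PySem

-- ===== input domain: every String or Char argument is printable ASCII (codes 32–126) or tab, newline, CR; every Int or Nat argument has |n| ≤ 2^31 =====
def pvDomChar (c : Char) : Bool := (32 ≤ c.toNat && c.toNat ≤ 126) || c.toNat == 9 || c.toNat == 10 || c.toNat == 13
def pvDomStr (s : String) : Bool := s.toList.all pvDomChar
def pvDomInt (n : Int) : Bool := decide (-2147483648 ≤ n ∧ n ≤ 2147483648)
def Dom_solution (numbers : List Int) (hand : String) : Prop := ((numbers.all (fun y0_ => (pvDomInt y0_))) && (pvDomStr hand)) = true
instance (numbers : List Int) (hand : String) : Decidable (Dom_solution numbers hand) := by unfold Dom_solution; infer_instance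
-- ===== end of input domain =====

-- B replaces A's single answer-building loop by two staged passes — a scan that
-- materialises the trajectory of both hand positions, then a zip reading the pressing
-- hand off each state — and A's difference lookup table by a closed-form distance.

-- ===== PORT A =====
def distance (position destination : Int) : Int :=
  let check := |position - destination|
  if check = 0 then 0
  else if check ∈ ([1, 3] : List Int) then 1
  else if check ∈ ([2, 4, 6] : List Int) then 2
  else if check ∈ ([5, 7, 9] : List Int) then 3
  else 4

def solutionGo (hand : String) (posL posR : Int) : List Int → List Char
  | [] => []
  | i :: rest =>
    if i ∈ ([1, 4, 7] : List Int) then 'L' :: solutionGo hand i posR rest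
    else if i ∈ ([3, 6, 9] : List Int) then 'R' :: solutionGo hand posL i rest
    else
      let j := if i = 0 then 11 else i
      if distance posL j < distance posR j then 'L' :: solutionGo hand j posR rest
      else if distance posL j > distance posR j then 'R' :: solutionGo hand posL j rest
      else if hand = "left" then 'L' :: solutionGo hand j posR rest
      else 'R' :: solutionGo hand posL j rest

def solution (numbers : List Int) (hand : String) : String :=
  String.mk (solutionGo hand 10 12 numbers)

-- ===== PORT B =====
-- which hand presses key n (0 renumbered to 11) from positions L, R
def nearer (hand : String) (L R n : Int) : Char :=
  let m := if n = 0 then 11 else n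
  if m ∈ ([1, 4, 7] : List Int) then 'L'
  else if m ∈ ([3, 6, 9] : List Int) then 'R'
  else
    let d := fun p : Int => min (PySem.Int.floordiv |p - m| 3 + PySem.Int.mod |p - m| 3) 4
    if d L < d R ∨ (d L = d R ∧ hand = "left") then 'L' else 'R'

-- one step of pass 1: append the next (L, R) state (traj[-1] is pyGet? traj (-1); nonempty, default unread)
def trajStep (hand : String) (traj : List (Int × Int)) (n : Int) : List (Int × Int) :=
  let LR := (PySem.List.pyGet? traj (-1)).getD (10, 12)
  let m := if n = 0 then 11 else n
  traj ++ [if nearer hand LR.1 LR.2 n = 'L' then (m, LR.2) else (LR.1, m)]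

def solution_alt (numbers : List Int) (hand : String) : String :=
  let traj := numbers.foldl (trajStep hand) [(10, 12)]
  String.mk ((traj.zip numbers).map (fun p => nearer hand p.1.1 p.1.2 p.2))

-- ===== PRECONDITION & SPEC =====
def Spec_solution (numbers : List Int) (hand : String) (out : String) : Prop := out = solution_alt numbers hand
instance (numbers : List Int) (hand : String) (out : String) : Decidable (Spec_solution numbers hand out) := by
  unfold Spec_solution; infer_instance

-- ===== CLAIM =====
def Claim_equal_solution : Prop := ∀ (numbers : List Int) (hand : String), Dom_solution numbers hand → Spec_solution numbers hand (solution numbers hand)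

-- ===== LEMMAS AND PROOFS =====

-- A's lookup table is the closed form min(c/3 + c%3, 4) of c = |p - m|, for ALL ints
lemma dist_closed (p m : Int) :
    distance p m = min (PySem.Int.floordiv |p - m| 3 + PySem.Int.mod |p - m| 3) 4 := by
  unfold distance
  rw [PySem.Int.floordiv_eq_ediv_of_pos (by norm_num), PySem.Int.mod_eq_emod_of_pos (by norm_num)]
  have hc : 0 ≤ |p - m| := abs_nonneg _
  generalize |p - m| = c at hc ⊢
  simp only [List.mem_cons, List.not_mem_nil, or_false, min_def]
  split_ifs <;> omega

-- the list of states pass 1 appends after the seed, one per pressed number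
def statesFrom (hand : String) (L R : Int) : List Int → List (Int × Int)
  | [] => []
  | n :: rest =>
    let m := if n = 0 then 11 else n
    let s := if nearer hand L R n = 'L' then (m, R) else (L, m)
    s :: statesFrom hand s.1 s.2 rest

lemma foldl_trajStep (hand : String) : ∀ (numbers : List Int) (t : List (Int × Int)) (L R : Int),
    (PySem.List.pyGet? t (-1)).getD (10, 12) = (L, R) →
    numbers.foldl (trajStep hand) t = t ++ statesFrom hand L R numbers := by
  intro numbers
  induction numbers with
  | nil => intro t L R _; simp [statesFrom]
  | cons n rest ih =>
    intro t L R hlast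
    have hstep : trajStep hand t n =
        t ++ [if nearer hand L R n = 'L' then ((if n = 0 then 11 else n), R)
              else (L, (if n = 0 then 11 else n))] := by
      unfold trajStep
      rw [hlast]
    simp only [List.foldl_cons, hstep, statesFrom]
    by_cases hside : nearer hand L R n = 'L'
    · rw [if_pos hside,
        ih (t ++ [((if n = 0 then 11 else n), R)]) (if n = 0 then 11 else n) R
          (by simp)]
      simp
    · rw [if_neg hside,
        ih (t ++ [(L, (if n = 0 then 11 else n))]) L (if n = 0 then 11 else n)
          (by simp)]
      simp

lemma zip_states_eq_go (hand : String) : ∀ (numbers : List Int) (L R : Int),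
    (((L, R) :: statesFrom hand L R numbers).zip numbers).map
        (fun p => nearer hand p.1.1 p.1.2 p.2) =
      solutionGo hand L R numbers := by
  intro numbers
  induction numbers with
  | nil => intro L R; rfl
  | cons n rest ih =>
    intro L R
    simp only [statesFrom, List.zip_cons_cons, List.map_cons]
    by_cases h147 : n ∈ ([1, 4, 7] : List Int)
    · have hn0 : ¬ (n = 0) := by
        simp only [List.mem_cons, List.not_mem_nil, or_false] at h147; omega
      have hm : (if n = 0 then 11 else n) = n := if_neg hn0
      have hside : nearer hand L R n = 'L' := by
        unfold nearer; rw [hm, if_pos h147]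
      simp [solutionGo, h147, hside, hm, ih n R]
    · by_cases h369 : n ∈ ([3, 6, 9] : List Int)
      · have hn0 : ¬ (n = 0) := by
          simp only [List.mem_cons, List.not_mem_nil, or_false] at h369; omega
        have hm : (if n = 0 then 11 else n) = n := if_neg hn0
        have hside : nearer hand L R n = 'R' := by
          unfold nearer; rw [hm, if_neg h147, if_pos h369]
        simp [solutionGo, h147, h369, hside, hm, ih L n]
      · -- middle-column key: both compare the same two distances
        have hm147 : ¬ ((if n = 0 then 11 else n) ∈ ([1, 4, 7] : List Int)) := by
          split <;> simp_all
        have hm369 : ¬ ((if n = 0 then 11 else n) ∈ ([3, 6, 9] : List Int)) := by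
          split <;> simp_all
        have hnear : nearer hand L R n =
            (if distance L (if n = 0 then 11 else n) < distance R (if n = 0 then 11 else n) ∨
                (distance L (if n = 0 then 11 else n) = distance R (if n = 0 then 11 else n) ∧
                 hand = "left") then 'L' else 'R') := by
          unfold nearer
          rw [if_neg hm147, if_neg hm369, dist_closed, dist_closed]
        simp only [solutionGo, if_neg h147, if_neg h369]
        rcases lt_trichotomy (distance L (if n = 0 then 11 else n))
            (distance R (if n = 0 then 11 else n)) with hlt | heq | hgt
        · have hside : nearer hand L R n = 'L' := by rw [hnear, if_pos (Or.inl hlt)]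
          simp [hlt, hside, ih _ R]
        · have hnlt : ¬ (distance L (if n = 0 then 11 else n) <
              distance R (if n = 0 then 11 else n)) := by omega
          have hngt : ¬ (distance L (if n = 0 then 11 else n) >
              distance R (if n = 0 then 11 else n)) := by omega
          by_cases hh : hand = "left"
          · subst hh
            have hside : nearer "left" L R n = 'L' := by
              rw [hnear, if_pos (Or.inr ⟨heq, rfl⟩)]
            simp [hnlt, hngt, hside, ih _ R]
          · have hside : nearer hand L R n = 'R' := by
              rw [hnear, if_neg (by tauto)]
            simp [hnlt, hngt, hh, hside, ih L _]
        · have hnlt : ¬ (distance L (if n = 0 then 11 else n) <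
              distance R (if n = 0 then 11 else n)) := by omega
          have hside : nearer hand L R n = 'R' := by
            rw [hnear, if_neg (by omega)]
          simp [hnlt, hgt, hside, ih L _]

-- ===== VERDICT =====
theorem solution_spec : Claim_equal_solution := by
  intro numbers hand _
  unfold Spec_solution solution solution_alt
  rw [foldl_trajStep hand numbers [(10, 12)] 10 12 (by decide)]
  simp only [List.singleton_append]
  rw [zip_states_eq_go]
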